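-- pv_equiv track=rewrite | github.com/Nikolay1123770/Botzayavka | bot.py | get_step_indicator
-- ===== SOURCE A (Python) =====
-- def get_step_indicator(step: int, total: int = 6) -> str:
--     """Индикатор шагов"""
--     steps = ""
--     for i in range(1, total + 1):
--         if i < step:
--             steps += "✅"
--         elif i == step:
--             steps += "📝"
--         else:
--             steps += "⬜"
--     return steps
-- ===== SOURCE B (Python) =====
-- def get_step_indicator(step: int, total: int = 6) -> str:
--     """Индикатор шагов"""
--     checks = min(max(step - 1, 0), total)
--     pencil = 1 if 1 <= step <= total else 0
--     blanks = total - checks - pencil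
--     return "".join(["✅"] * checks + ["📝"] * pencil + ["⬜"] * blanks)
-- ===== Notes on version B (the rewrite author's own statement) =====
-- stated objective: idiomatic
-- what changed: Replaces the per-position loop with a closed-form computation of the three glyph counts (clamped with min/max), building the result by glyph-list replication and a single join.
import Mathlib
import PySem

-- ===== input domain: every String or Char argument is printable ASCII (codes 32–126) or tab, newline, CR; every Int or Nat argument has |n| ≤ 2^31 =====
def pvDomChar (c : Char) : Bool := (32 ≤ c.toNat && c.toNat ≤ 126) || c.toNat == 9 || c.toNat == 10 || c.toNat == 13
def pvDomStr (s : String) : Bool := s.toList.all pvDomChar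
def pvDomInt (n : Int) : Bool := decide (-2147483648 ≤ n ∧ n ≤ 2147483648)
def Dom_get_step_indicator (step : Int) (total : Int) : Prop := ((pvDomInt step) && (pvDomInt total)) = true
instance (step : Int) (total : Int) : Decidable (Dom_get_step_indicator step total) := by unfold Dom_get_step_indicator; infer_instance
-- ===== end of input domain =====

-- B replaces A's per-position loop by a closed-form computation of the three glyph
-- counts (clamped with min/max) followed by string repetition (objective: idiomatic).


-- ===== PORT A =====
def get_step_indicator (step : Int) (total : Int) : String :=
  (PySem.List.pyRange 1 (total + 1) 1).foldl
    (fun steps i =>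
      if i < step then steps ++ "✅"
      else if i = step then steps ++ "📝"
      else steps ++ "⬜") ""

-- ===== PORT B =====
def get_step_indicator_alt (step : Int) (total : Int) : String :=
  let checks := min (max (step - 1) 0) total
  let pencil : Int := if 1 ≤ step ∧ step ≤ total then 1 else 0
  let blanks := total - checks - pencil
  String.join (List.replicate checks.toNat "✅" ++ List.replicate pencil.toNat "📝" ++
    List.replicate blanks.toNat "⬜")

-- ===== PRECONDITION & SPEC =====
def Spec_get_step_indicator (step : Int) (total : Int) (out : String) : Prop := out = get_step_indicator_alt step total
instance (step : Int) (total : Int) (out : String) : Decidable (Spec_get_step_indicator step total out) := by unfold Spec_get_step_indicator; infer_instance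

-- ===== CLAIM (what is proved, stated in full; the proofs are below) =====
def Claim_equal_get_step_indicator : Prop := ∀ (step : Int) (total : Int), Dom_get_step_indicator step total → Spec_get_step_indicator step total (get_step_indicator step total)

-- ===== LEMMAS AND PROOFS =====

-- "s" * n as a String for an int n (empty for n ≤ 0): proof-side abbreviation
def strRep (s : String) (n : Int) : String := String.join (List.replicate n.toNat s)

theorem join_cons (a : String) (l : List String) :
    String.join (a :: l) = a ++ String.join l := by
  induction l generalizing a with
  | nil => simp [String.join]
  | cons b l ih =>
    show String.join ((a ++ b) :: l) = a ++ String.join (b :: l)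
    rw [ih (a ++ b), ih b, String.append_assoc]

theorem join_append (l1 l2 : List String) :
    String.join (l1 ++ l2) = String.join l1 ++ String.join l2 := by
  induction l1 with
  | nil => simp [String.join]
  | cons a l ih => rw [List.cons_append, join_cons, ih, join_cons, String.append_assoc]

theorem alt_def (step total : Int) : get_step_indicator_alt step total =
    strRep "✅" (min (max (step - 1) 0) total) ++
    strRep "📝" (if 1 ≤ step ∧ step ≤ total then 1 else 0) ++
    strRep "⬜" (total - min (max (step - 1) 0) total -
      (if 1 ≤ step ∧ step ≤ total then 1 else 0)) := by
  simp [get_step_indicator_alt, strRep, join_append, String.append_assoc]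

theorem strRep_nonpos (s : String) (k : Int) (h : k ≤ 0) : strRep s k = "" := by
  simp [strRep, Int.toNat_of_nonpos h, String.join]

theorem strRep_succ (s : String) (k : Int) (h : 0 ≤ k) : strRep s (k + 1) = strRep s k ++ s := by
  unfold strRep
  have : (k + 1).toNat = k.toNat + 1 := by omega
  rw [this, List.replicate_succ', join_append, join_cons]
  simp [String.join]

theorem nonpos_case (step total : Int) (h : total ≤ 0) :
    get_step_indicator step total = get_step_indicator_alt step total := by
  have hr : PySem.List.pyRange 1 (total + 1) 1 = [] :=
    PySem.List.pyRange_one_eq_nil (by omega)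
  have hc : min (max (step - 1) 0) total = total := by omega
  have hp : ¬ (1 ≤ step ∧ step ≤ total) := by omega
  rw [alt_def, hc, if_neg hp]
  simp [get_step_indicator, hr, strRep_nonpos _ _ h, strRep_nonpos _ _ (le_refl 0)]

theorem main_eq : ∀ (total : Nat) (step : Int),
    get_step_indicator step (total : Int) = get_step_indicator_alt step (total : Int) := by
  intro total
  induction total with
  | zero => intro step; exact nonpos_case step 0 (le_refl 0)
  | succ n ih =>
    intro step
    have hm : (0 : Int) ≤ (n : Int) := Int.natCast_nonneg n
    have hsplit : PySem.List.pyRange 1 (((n + 1 : Nat) : Int) + 1) 1 =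
        PySem.List.pyRange 1 ((n : Int) + 1) 1 ++ [(n : Int) + 1] := by
      push_cast
      exact PySem.List.pyRange_one_succ_right (by omega)
    have hA : get_step_indicator step ((n + 1 : Nat) : Int) =
        (if (n : Int) + 1 < step then get_step_indicator step (n : Int) ++ "✅"
         else if (n : Int) + 1 = step then get_step_indicator step (n : Int) ++ "📝"
         else get_step_indicator step (n : Int) ++ "⬜") := by
      rw [get_step_indicator, hsplit, List.foldl_append]
      rfl
    rw [hA, ih step]
    push_cast
    rcases lt_trichotomy ((n : Int) + 1) step with h | h | h
    · -- glyph ✅ : step > n+1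
      rw [if_pos h, alt_def, alt_def]
      have hc1 : min (max (step - 1) 0) ((n : Int)) = n := by omega
      have hc2 : min (max (step - 1) 0) ((n : Int) + 1) = (n : Int) + 1 := by omega
      have hp1 : ¬ (1 ≤ step ∧ step ≤ (n : Int)) := by omega
      have hp2 : ¬ (1 ≤ step ∧ step ≤ (n : Int) + 1) := by omega
      rw [hc1, hc2, if_neg hp1, if_neg hp2]
      rw [strRep_succ _ _ hm]
      simp [strRep_nonpos _ (0 : Int) (le_refl 0)]
    · -- glyph 📝 : step = n+1
      rw [if_neg (by omega), if_pos h, alt_def, alt_def]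
      have hc1 : min (max (step - 1) 0) ((n : Int)) = n := by omega
      have hc2 : min (max (step - 1) 0) ((n : Int) + 1) = (n : Int) := by omega
      have hp1 : ¬ (1 ≤ step ∧ step ≤ (n : Int)) := by omega
      have hp2 : (1 ≤ step ∧ step ≤ (n : Int) + 1) := by omega
      rw [hc1, hc2, if_neg hp1, if_pos hp2]
      have h1 : strRep "📝" 1 = "" ++ "📝" := rfl
      simp [h1, strRep_nonpos _ (0 : Int) (le_refl 0)]
    · -- glyph ⬜ : step < n+1, i.e. step ≤ n
      rw [if_neg (by omega), if_neg (by omega), alt_def, alt_def]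
      have hc : min (max (step - 1) 0) ((n : Int) + 1) = min (max (step - 1) 0) ((n : Int)) := by
        omega
      have hp : (1 ≤ step ∧ step ≤ (n : Int) + 1) ↔ (1 ≤ step ∧ step ≤ (n : Int)) := by
        constructor <;> (intro hx; omega)
      rw [hc, if_congr hp rfl rfl]
      set c := min (max (step - 1) 0) ((n : Int)) with hcdef
      set p : Int := if 1 ≤ step ∧ step ≤ (n : Int) then 1 else 0 with hpdef
      have hbl : (n : Int) + 1 - c - p = ((n : Int) - c - p) + 1 := by omega
      have hblpos : 0 ≤ (n : Int) - c - p := by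
        have hcle : c ≤ max (step - 1) 0 := min_le_left _ _
        by_cases hs : 1 ≤ step ∧ step ≤ (n : Int)
        · have : p = 1 := by rw [hpdef, if_pos hs]
          have : c ≤ step - 1 := by omega
          omega
        · have : p = 0 := by rw [hpdef, if_neg hs]
          have : c ≤ (n : Int) := min_le_right _ _
          omega
      rw [hbl, strRep_succ _ _ hblpos, String.append_assoc]

-- ===== VERDICT (by name: the statement is the Claim_ definition above) =====
theorem get_step_indicator_spec : Claim_equal_get_step_indicator := by
  intro step total _
  unfold Spec_get_step_indicator
  by_cases h : 0 ≤ total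
  · obtain ⟨n, rfl⟩ := Int.eq_ofNat_of_zero_le h
    exact main_eq n step
  · exact nonpos_case step total (by omega)
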